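-- pv_equiv track=rewrite | github.com/jvalenty/webmatic | backend/app/projects/router.py | _diff_plans
-- ===== SOURCE A (Python) =====
-- from typing import List, Optional, Dict, Any
--
-- def _list_to_set_map(plan_list: List[str]) -> set:
--     return set([str(x).strip() for x in (plan_list or []) if str(x).strip()])
--
-- def _diff_plans(a: Dict[str, Any], b: Dict[str, Any]) -> Dict[str, Any]:
--     # a/b have keys frontend/backend/database: List[str]
--     out = {}
--     for k in ["frontend", "backend", "database"]:
--         sa = _list_to_set_map(a.get(k, []))
--         sb = _list_to_set_map(b.get(k, []))
--         out[k] = {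
--             "only_in_a": sorted(list(sa - sb)),
--             "only_in_b": sorted(list(sb - sa)),
--             "overlap": sorted(list(sa & sb)),
--         }
--     return out
-- ===== SOURCE B (Python) =====
-- from typing import List, Dict, Any
--
-- def _clean(plan_list: List[str]) -> set:
--     return {str(x).strip() for x in (plan_list or [])} - {""}
--
-- def _diff_plans(a: Dict[str, Any], b: Dict[str, Any]) -> Dict[str, Any]:
--     out = {}
--     for k in ("frontend", "backend", "database"):
--         sa = _clean(a.get(k, []))
--         sb = _clean(b.get(k, []))
--         buckets = {"only_in_a": [], "only_in_b": [], "overlap": []}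
--         for x in sorted(sa | sb):
--             if x in sa and x in sb:
--                 buckets["overlap"].append(x)
--             elif x in sa:
--                 buckets["only_in_a"].append(x)
--             else:
--                 buckets["only_in_b"].append(x)
--         out[k] = buckets
--     return out
-- ===== Notes on version B (the rewrite author's own statement) =====
-- stated objective: alternative
-- what changed: Per category B sorts the union once and classifies each element into overlap/only_in_a/only_in_b in a single pass (cleaning via a set comprehension minus {''}), instead of A's three separate set operations each sorted independently.
import Mathlib
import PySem

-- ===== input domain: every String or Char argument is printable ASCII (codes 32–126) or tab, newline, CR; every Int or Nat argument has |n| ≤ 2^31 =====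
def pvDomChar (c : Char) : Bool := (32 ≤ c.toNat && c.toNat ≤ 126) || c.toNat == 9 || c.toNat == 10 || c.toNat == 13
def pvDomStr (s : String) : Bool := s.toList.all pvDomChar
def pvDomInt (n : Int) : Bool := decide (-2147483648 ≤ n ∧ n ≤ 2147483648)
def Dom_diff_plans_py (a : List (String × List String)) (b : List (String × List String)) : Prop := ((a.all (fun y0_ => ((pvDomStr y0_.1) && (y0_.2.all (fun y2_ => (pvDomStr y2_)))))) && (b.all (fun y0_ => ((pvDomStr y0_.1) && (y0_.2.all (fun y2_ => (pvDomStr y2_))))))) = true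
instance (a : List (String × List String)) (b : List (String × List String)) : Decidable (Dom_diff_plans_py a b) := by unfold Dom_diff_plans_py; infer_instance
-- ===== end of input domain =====

-- B replaces the three independent set operations (sa-sb, sb-sa, sa&sb, each sorted) by one
-- classifying pass over the sorted union; same results, alternative decomposition (not faster).


-- ===== PORT A =====
-- _list_to_set_map: set([str(x).strip() for x in (plan_list or []) if str(x).strip()])
def pvClean_a (l : List String) : PySem.Set String :=
  PySem.Set.ofList ((l.map PySem.Str.strip).filter (fun s => !(s == "")))

-- the inner dict literal {only_in_a: …, only_in_b: …, overlap: …} (three distinct fresh keys) as its items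
def pvVal_a (sa sb : PySem.Set String) : List (String × List String) :=
  [("only_in_a", PySem.List.sorted (sa.diff sb) (fun x => x)),
   ("only_in_b", PySem.List.sorted (sb.diff sa) (fun x => x)),
   ("overlap",  PySem.List.sorted (sa.inter sb) (fun x => x))]

def pvEntry_a (da db : PySem.Dict String (List String)) (k : String) : List (String × List String) :=
  pvVal_a (pvClean_a (da.getD k [])) (pvClean_a (db.getD k []))

def diff_plans_py (a : List (String × List String)) (b : List (String × List String)) : List (String × List (String × List String)) :=
  let da := PySem.Dict.mk a
  let db := PySem.Dict.mk b
  ((["frontend", "backend", "database"]).foldl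
    (fun out k => out.insert k (pvEntry_a da db k)) (PySem.Dict.mk [])).items

-- ===== PORT B =====
-- _clean: {str(x).strip() for x in (plan_list or [])} - {""}
def pvClean_alt (l : List String) : PySem.Set String :=
  PySem.Set.diff (PySem.Set.ofList (l.map PySem.Str.strip)) [""]

-- one pass over sorted(sa | sb) appending each x to its bucket; the buckets triple
-- (only_in_a, only_in_b, overlap) is read back by projection
def pvBuckets_alt (sa sb : PySem.Set String) : List String × List String × List String :=
  (PySem.List.sorted (sa.union sb) (fun x => x)).foldl
    (fun st x =>
      if sa.contains x && sb.contains x then (st.1, st.2.1, st.2.2 ++ [x])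
      else if sa.contains x then (st.1 ++ [x], st.2.1, st.2.2)
      else (st.1, st.2.1 ++ [x], st.2.2))
    (([] : List String), ([] : List String), ([] : List String))

def pvVal_alt (sa sb : PySem.Set String) : List (String × List String) :=
  [("only_in_a", (pvBuckets_alt sa sb).1), ("only_in_b", (pvBuckets_alt sa sb).2.1),
   ("overlap", (pvBuckets_alt sa sb).2.2)]

def pvEntry_alt (da db : PySem.Dict String (List String)) (k : String) : List (String × List String) :=
  pvVal_alt (pvClean_alt (da.getD k [])) (pvClean_alt (db.getD k []))

def diff_plans_py_alt (a : List (String × List String)) (b : List (String × List String)) : List (String × List (String × List String)) :=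
  let da := PySem.Dict.mk a
  let db := PySem.Dict.mk b
  ((["frontend", "backend", "database"]).foldl
    (fun out k => out.insert k (pvEntry_alt da db k)) (PySem.Dict.mk [])).items

-- ===== PRECONDITION & SPEC =====
def Spec_diff_plans_py (a : List (String × List String)) (b : List (String × List String)) (out : List (String × List (String × List String))) : Prop := out = diff_plans_py_alt a b
instance (a : List (String × List String)) (b : List (String × List String)) (out : List (String × List (String × List String))) : Decidable (Spec_diff_plans_py a b out) := by unfold Spec_diff_plans_py; infer_instance

-- ===== CLAIM (what is proved, stated in full; the proofs are below) =====
def Claim_equal_diff_plans_py : Prop := ∀ (a : List (String × List String)) (b : List (String × List String)), Dom_diff_plans_py a b → Spec_diff_plans_py a b (diff_plans_py a b)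

-- ===== LEMMAS AND PROOFS =====

-- the two cleanings agree as sets (same membership)
lemma pv_mem_clean (l : List String) (x : String) : x ∈ pvClean_a l ↔ x ∈ pvClean_alt l := by
  simp [pvClean_a, pvClean_alt, PySem.Set.mem_ofList, PySem.Set.mem_diff, List.mem_filter]

-- B's single classifying fold computes the three filters of its input
lemma pv_classify_fold (sa sb : PySem.Set String) (l : List String) (oa ob ov : List String) :
    l.foldl
      (fun st x =>
        if sa.contains x && sb.contains x then (st.1, st.2.1, st.2.2 ++ [x])
        else if sa.contains x then (st.1 ++ [x], st.2.1, st.2.2)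
        else (st.1, st.2.1 ++ [x], st.2.2)) (oa, ob, ov)
    = (oa ++ l.filter (fun x => sa.contains x && !sb.contains x),
       ob ++ l.filter (fun x => !sa.contains x),
       ov ++ l.filter (fun x => sa.contains x && sb.contains x)) := by
  induction l generalizing oa ob ov with
  | nil => simp
  | cons y t ih =>
    cases hA : sa.contains y <;> cases hB : sb.contains y <;>
      simp only [List.foldl_cons, List.filter_cons, hA, hB, Bool.true_and, Bool.false_and,
        Bool.and_true, Bool.and_false, Bool.not_true, Bool.not_false, if_true, if_false, ih] <;>
      simp

-- a sorted-without-key list of distinct elements is strictly increasing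
lemma pv_sorted_pairwise_lt (xs : List String) (hnd : xs.Nodup) :
    (PySem.List.sorted xs (fun x => x)).Pairwise (· < ·) := by
  have hle := PySem.List.sorted_pairwise xs (fun x => x)
  have hnd' : (PySem.List.sorted xs (fun x => x)).Nodup :=
    ((PySem.List.sorted_perm xs (fun x => x) false).nodup_iff).2 hnd
  exact (hle.and hnd').imp (fun h => lt_of_le_of_ne h.1 h.2)

-- the per-key value computed by A equals the one computed by B
lemma pv_val_eq (sa sb sa' sb' : PySem.Set String)
    (hma : ∀ x, x ∈ sa ↔ x ∈ sa') (hmb : ∀ x, x ∈ sb ↔ x ∈ sb')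
    (hnda : sa.Nodup) (hndb : sb.Nodup) (hnda' : sa'.Nodup) :
    pvVal_a sa sb = pvVal_alt sa' sb' := by
  have hundup : (PySem.List.sorted (sa'.union sb') (fun x => x)).Nodup :=
    ((PySem.List.sorted_perm _ _ false).nodup_iff).2 (PySem.Set.nodup_union _ _ hnda')
  have hult := pv_sorted_pairwise_lt _ (PySem.Set.nodup_union sa' sb' hnda')
  have hmu : ∀ x, x ∈ PySem.List.sorted (sa'.union sb') (fun x => x) ↔ x ∈ sa' ∨ x ∈ sb' := by
    intro x
    rw [(PySem.List.sorted_perm _ _ false).mem_iff, PySem.Set.mem_union]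
  have comp : ∀ (p : String → Bool) (target : List String), target.Nodup →
      (∀ x, x ∈ target ↔ x ∈ PySem.List.sorted (sa'.union sb') (fun x => x) ∧ p x = true) →
      PySem.List.sorted target (fun x => x) = (PySem.List.sorted (sa'.union sb') (fun x => x)).filter p := by
    intro p target hndt hmt
    refine PySem.List.sorted_eq_of_perm_of_pairwise_lt _ _ _ ?_ (hult.filter p)
    refine (List.perm_ext_iff_of_nodup (hundup.filter p) hndt).2 ?_
    intro x
    rw [hmt x, List.mem_filter]
  have hb : pvBuckets_alt sa' sb' =
      ((PySem.List.sorted (sa'.union sb') (fun x => x)).filter (fun x => sa'.contains x && !sb'.contains x),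
       (PySem.List.sorted (sa'.union sb') (fun x => x)).filter (fun x => !sa'.contains x),
       (PySem.List.sorted (sa'.union sb') (fun x => x)).filter (fun x => sa'.contains x && sb'.contains x)) := by
    unfold pvBuckets_alt
    rw [pv_classify_fold]
    simp
  have h1 : PySem.List.sorted (sa.diff sb) (fun x => x)
      = (PySem.List.sorted (sa'.union sb') (fun x => x)).filter (fun x => sa'.contains x && !sb'.contains x) := by
    refine comp _ _ (PySem.Set.nodup_diff _ _ hnda) ?_
    intro x
    simp only [PySem.Set.mem_diff, hmu x, hma x, hmb x, Bool.and_eq_true, Bool.not_eq_true',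
      ← Bool.not_eq_true, PySem.Set.contains_iff]
    tauto
  have h2 : PySem.List.sorted (sb.diff sa) (fun x => x)
      = (PySem.List.sorted (sa'.union sb') (fun x => x)).filter (fun x => !sa'.contains x) := by
    refine comp _ _ (PySem.Set.nodup_diff _ _ hndb) ?_
    intro x
    simp only [PySem.Set.mem_diff, hmu x, hma x, hmb x, Bool.not_eq_true',
      ← Bool.not_eq_true, PySem.Set.contains_iff]
    tauto
  have h3 : PySem.List.sorted (sa.inter sb) (fun x => x)
      = (PySem.List.sorted (sa'.union sb') (fun x => x)).filter (fun x => sa'.contains x && sb'.contains x) := by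
    refine comp _ _ (PySem.Set.nodup_inter _ _ hnda) ?_
    intro x
    simp only [PySem.Set.mem_inter, hmu x, hma x, hmb x, Bool.and_eq_true,
      PySem.Set.contains_iff]
    tauto
  simp [pvVal_a, pvVal_alt, hb, h1, h2, h3]

lemma pv_entry_eq (da db : PySem.Dict String (List String)) (k : String) :
    pvEntry_a da db k = pvEntry_alt da db k := by
  unfold pvEntry_a pvEntry_alt
  exact pv_val_eq _ _ _ _ (pv_mem_clean _) (pv_mem_clean _)
    (PySem.Set.nodup_ofList _) (PySem.Set.nodup_ofList _)
    (PySem.Set.nodup_diff _ _ (PySem.Set.nodup_ofList _))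

-- ===== VERDICT (by name: the statement is the Claim_ definition above) =====
theorem diff_plans_py_spec : Claim_equal_diff_plans_py := by
  intro a b _
  unfold Spec_diff_plans_py diff_plans_py diff_plans_py_alt
  simp only [pv_entry_eq]
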